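-- pv_equiv track=rewrite | github.com/wjpark11/advent-of-code-2025 | day04.py | get_accecible_rolls_and_next_grid
-- ===== SOURCE A (Python) =====
-- def get_accecible_rolls_and_next_grid(
--     grid: list[list[str]],
-- ) -> tuple[int, list[list[str]]]:
--     directions = [(-1, -1), (-1, 0), (-1, 1), (0, -1), (0, 1), (1, -1), (1, 0), (1, 1)]
--     accecible_rolls = 0
--     next_grid = [row.copy() for row in grid]
--
--     for i, row in enumerate(grid):
--         for j, _ in enumerate(row):
--             if _ == "@":
--                 count = 0
--                 for dr, dc in directions:
--                     r, c = i + dr, j + dc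
--                     if 0 <= r < len(grid) and 0 <= c < len(grid[0]):
--                         if grid[r][c] == "@":
--                             count += 1
--                 if count < 4:
--                     next_grid[i][j] = "."
--                     accecible_rolls += 1
--     return accecible_rolls, next_grid
-- ===== SOURCE B (Python) =====
-- def get_accecible_rolls_and_next_grid(
--     grid: list[list[str]],
-- ) -> tuple[int, list[list[str]]]:
--     # Stage 1: per-row prefix-sum arrays of '@' counts (prefs[i][k] = number of
--     # '@' in grid[i][:k]); each neighbourhood count then costs three O(1)
--     # prefix differences instead of an 8-direction scan.
--     prefs = []
--     for row in grid:
--         p = [0]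
--         s = 0
--         for cell in row:
--             s += cell == "@"
--             p.append(s)
--         prefs.append(p)
--
--     accecible_rolls = 0
--     next_grid = []
--     for i, row in enumerate(grid):
--         new_row = []
--         for j, cell in enumerate(row):
--             if cell == "@":
--                 window = 0
--                 for p in prefs[max(i - 1, 0):i + 2]:
--                     window += (p[min(j + 2, len(p) - 1)]
--                                - p[min(max(j - 1, 0), len(p) - 1)])
--                 if window < 5:  # window includes the cell itself
--                     new_row.append(".")
--                     accecible_rolls += 1
--                 else:
--                     new_row.append(cell)
--             else:
--                 new_row.append(cell)
--         next_grid.append(new_row)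
--     return accecible_rolls, next_grid
-- ===== Notes on version B (the rewrite author's own statement) =====
-- stated objective: alternative
-- what changed: B is staged: a first pass builds per-row prefix-sum arrays of '@' counts, and each '@' cell's 3x3 window is then obtained as three clamped prefix differences (window<5, since it includes the cell) instead of A's per-cell 8-direction offset-and-bounds scan; the next grid is built by appending fresh rows instead of copy-and-mutate.
-- outside the precondition, e.g. on get_accecible_rolls_and_next_grid([['.', '@'], []]): A raises IndexError, B returns (1, [['.', '.'], []])
import Mathlib
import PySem

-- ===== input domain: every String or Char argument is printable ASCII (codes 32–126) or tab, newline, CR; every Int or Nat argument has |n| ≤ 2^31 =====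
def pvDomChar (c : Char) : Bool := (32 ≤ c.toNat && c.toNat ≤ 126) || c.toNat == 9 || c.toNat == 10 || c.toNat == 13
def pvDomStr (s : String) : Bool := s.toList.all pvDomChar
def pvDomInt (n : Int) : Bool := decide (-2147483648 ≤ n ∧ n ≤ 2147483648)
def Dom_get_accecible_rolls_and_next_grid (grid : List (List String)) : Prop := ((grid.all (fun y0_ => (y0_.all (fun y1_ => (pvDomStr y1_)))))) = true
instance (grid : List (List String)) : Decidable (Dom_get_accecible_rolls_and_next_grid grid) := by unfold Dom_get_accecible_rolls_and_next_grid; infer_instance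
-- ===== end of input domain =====

-- B is staged: it precomputes per-row prefix-sum arrays of '@' counts and reads each
-- 3x3 window as three prefix differences instead of A's 8-direction scan (objective:
-- alternative). Equivalence is about the RETURN value only (neither mutates its argument).

-- ===== PORT A =====
def pvDirections : List (Int × Int) :=
  [(-1, -1), (-1, 0), (-1, 1), (0, -1), (0, 1), (1, -1), (1, 0), (1, 1)]

-- count for one '@' cell: grid[r][c] via pyGetD (in range whenever Python does not raise,
-- which Pre_ guarantees); len(grid[0]) as headD [] (Python only evaluates it when grid ≠ []).
def pvCountA (grid : List (List String)) (i j : Int) : Int :=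
  pvDirections.foldl (fun count d =>
    let r := i + d.1
    let c := j + d.2
    if 0 ≤ r ∧ r < (grid.length : Int) ∧ 0 ≤ c ∧ c < ((grid.headD []).length : Int) then
      (if PySem.List.pyGetD (PySem.List.pyGetD grid r []) c "" == "@" then count + 1 else count)
    else count) 0

def get_accecible_rolls_and_next_grid (grid : List (List String)) : Int × List (List String) :=
  let next0 := grid.map (fun row => row)
  (PySem.List.enumerate grid 0).foldl (fun st p =>
    (PySem.List.enumerate p.2 0).foldl (fun st2 q =>
      if q.2 == "@" then
        if pvCountA grid p.1 q.1 < 4 then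
          (st2.1 + 1, st2.2.set p.1.toNat ((st2.2.getD p.1.toNat []).set q.1.toNat "."))
        else st2
      else st2) st) (0, next0)

-- ===== PORT B =====
-- p = [0]; s = 0; for cell in row: s += cell == "@"; p.append(s)
def pvPrefRow (row : List String) : List Int :=
  (row.foldl (fun (st : List Int × Int) cell =>
    let s := st.2 + (if cell == "@" then 1 else 0)
    (st.1 ++ [s], s)) ([0], 0)).1

-- p[min(j + 2, len(p) - 1)] - p[min(max(j - 1, 0), len(p) - 1)]
def pvTermB (p : List Int) (j : Int) : Int :=
  PySem.List.pyGetD p (min (j + 2) ((p.length : Int) - 1)) 0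
    - PySem.List.pyGetD p (min (max (j - 1) 0) ((p.length : Int) - 1)) 0

-- window = 0; for p in prefs[max(i-1,0):i+2]: window += …
def pvWinB (prefs : List (List Int)) (i j : Int) : Int :=
  (PySem.List.slice prefs (some (max (i - 1) 0)) (some (i + 2))).foldl
    (fun w p => w + pvTermB p j) 0

def get_accecible_rolls_and_next_grid_alt (grid : List (List String)) : Int × List (List String) :=
  let prefs := grid.foldl (fun acc row => acc ++ [pvPrefRow row]) []
  (PySem.List.enumerate grid 0).foldl (fun st p =>
    let inner := (PySem.List.enumerate p.2 0).foldl (fun (st2 : Int × List String) q =>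
      if q.2 == "@" then
        if pvWinB prefs p.1 q.1 < 5 then (st2.1 + 1, st2.2 ++ ["."])
        else (st2.1, st2.2 ++ [q.2])
      else (st2.1, st2.2 ++ [q.2])) (st.1, ([] : List String))
    (inner.1, st.2 ++ [inner.2])) (0, ([] : List (List String)))

-- ===== PRECONDITION & SPEC =====
-- Pre_ excludes ragged grids that contain an '@' cell: there A either raises IndexError
-- (reading past the end of a short row) or clips neighbourhoods at len(grid[0]) — an
-- accident of A's bound choice; B uses each row's own extent.
def Pre_get_accecible_rolls_and_next_grid (grid : List (List String)) : Prop :=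
  (∀ row ∈ grid, row.length = (grid.headD []).length) ∨ (∀ row ∈ grid, "@" ∉ row)

instance (grid : List (List String)) : Decidable (Pre_get_accecible_rolls_and_next_grid grid) := by
  unfold Pre_get_accecible_rolls_and_next_grid; infer_instance

def pvWitness_get_accecible_rolls_and_next_grid : List (List String) :=
  [["@", "."], [".", "."]]

def Spec_get_accecible_rolls_and_next_grid (grid : List (List String)) (out : Int × List (List String)) : Prop := out = get_accecible_rolls_and_next_grid_alt grid
instance (grid : List (List String)) (out : Int × List (List String)) : Decidable (Spec_get_accecible_rolls_and_next_grid grid out) := by unfold Spec_get_accecible_rolls_and_next_grid; infer_instance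

-- ===== CLAIM (what is proved, stated in full; the proofs are below) =====
def Claim_equal_get_accecible_rolls_and_next_grid : Prop := ∀ (grid : List (List String)), Dom_get_accecible_rolls_and_next_grid grid → Pre_get_accecible_rolls_and_next_grid grid → Spec_get_accecible_rolls_and_next_grid grid (get_accecible_rolls_and_next_grid grid)

-- ===== LEMMAS AND PROOFS =====

-- canonical per-cell conditions
def pvCondA (grid : List (List String)) (i j : Int) (cell : String) : Bool :=
  cell == "@" && decide (pvCountA grid i j < 4)

def pvCondB (prefs : List (List Int)) (i j : Int) (cell : String) : Bool :=
  cell == "@" && decide (pvWinB prefs i j < 5)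

-- canonical result of one row / of the whole grid
def pvRowCnt (cond : Int → String → Bool) : List String → Nat → Int
  | [], _ => 0
  | c :: cs, n => (if cond n c then 1 else 0) + pvRowCnt cond cs (n + 1)

def pvRowMap (cond : Int → String → Bool) : List String → Nat → List String
  | [], _ => []
  | c :: cs, n => (if cond n c then "." else c) :: pvRowMap cond cs (n + 1)

def pvGridCnt (cond : Int → Int → String → Bool) : List (List String) → Nat → Int
  | [], _ => 0
  | r :: rs, n => pvRowCnt (cond n) r 0 + pvGridCnt cond rs (n + 1)

def pvGridMap (cond : Int → Int → String → Bool) : List (List String) → Nat → List (List String)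
  | [], _ => []
  | r :: rs, n => pvRowMap (cond n) r 0 :: pvGridMap cond rs (n + 1)

-- what A's in-place sets do to the current row
def pvApplyRow (cond : Int → String → Bool) : List String → List String → Nat → List String
  | [], cur, _ => cur
  | c :: cs, cur, n => pvApplyRow cond cs (if cond n c then cur.set n "." else cur) (n + 1)

lemma pvDropSucc {α : Type} (l : List α) (n : Nat) (c : α) (cs : List α)
    (h : l.drop n = c :: cs) : l.drop (n + 1) = cs := by
  have h2 : (l.drop n).tail = cs := by rw [h]; rfl
  simpa [List.tail_drop] using h2

lemma pvDropLt {α : Type} (l : List α) (n : Nat) (c : α) (cs : List α)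
    (h : l.drop n = c :: cs) : n < l.length := by
  by_contra hc
  rw [List.drop_eq_nil_iff.mpr (by omega)] at h
  simp at h

lemma pvDropGetD {α : Type} (l : List α) (n : Nat) (c : α) (cs : List α) (d : α)
    (h : l.drop n = c :: cs) : l.getD n d = c := by
  have h2 := congrArg (·.head?) h
  simp only [List.head?_drop, List.head?_cons] at h2
  rw [List.getD_eq_getElem?_getD, h2]; rfl

lemma pvTakeSet {α : Type} (l : List α) (n : Nat) (v : α) (h : n < l.length) :
    (l.set n v).take (n + 1) = l.take n ++ [v] := by
  rw [List.set_eq_take_cons_drop v h, List.take_append]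
  have h1 : (l.take n).length = n := by simp; omega
  rw [List.take_of_length_le (by omega), h1]
  simp

lemma pvTakeSucc {α : Type} (l : List α) (n : Nat) (c : α) (cs : List α)
    (h : l.drop n = c :: cs) : l.take (n + 1) = l.take n ++ [c] := by
  have hlt := pvDropLt l n c cs h
  have h2 := congrArg (·.head?) h
  simp only [List.head?_drop, List.head?_cons] at h2
  rw [List.take_add_one, h2]; rfl

lemma pvApplyRow_eq (cond : Int → String → Bool) :
    ∀ (rs cur : List String) (n : Nat), cur.drop n = rs →
      pvApplyRow cond rs cur n = cur.take n ++ pvRowMap cond rs n := by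
  intro rs
  induction rs with
  | nil =>
    intro cur n h
    rw [pvApplyRow, pvRowMap, List.append_nil,
      List.take_of_length_le (List.drop_eq_nil_iff.mp h)]
  | cons c cs ih =>
    intro cur n h
    have hlt := pvDropLt cur n c cs h
    have h1 := pvDropSucc cur n c cs h
    rw [pvApplyRow, pvRowMap]
    by_cases hcond : cond n c
    · rw [if_pos hcond, if_pos hcond]
      have h1' : (cur.set n ".").drop (n + 1) = cs := by
        rw [List.drop_set_of_lt (by omega : n < n + 1)]; exact h1
      rw [ih _ _ h1', pvTakeSet cur n "." hlt]
      simp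
    · rw [if_neg hcond, if_neg hcond]
      rw [ih _ _ h1, pvTakeSucc cur n c cs h]
      simp

lemma innerB (prefs : List (List Int)) (i : Int) :
    ∀ (row : List String) (n : Nat) (a : Int) (out : List String),
      (PySem.List.enumerate row (n : Int)).foldl (fun (st2 : Int × List String) q =>
        if q.2 == "@" then
          if pvWinB prefs i q.1 < 5 then (st2.1 + 1, st2.2 ++ ["."])
          else (st2.1, st2.2 ++ [q.2])
        else (st2.1, st2.2 ++ [q.2])) (a, out)
      = (a + pvRowCnt (pvCondB prefs i) row n, out ++ pvRowMap (pvCondB prefs i) row n) := by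
  intro row
  induction row with
  | nil => intro n a out; simp [PySem.List.enumerate_nil, pvRowCnt, pvRowMap]
  | cons c cs ih =>
    intro n a out
    rw [PySem.List.enumerate_cons, List.foldl_cons]
    have hcast : ((n : Int) + 1) = ((n + 1 : Nat) : Int) := by push_cast; ring
    by_cases hc : (c == "@") = true
    · by_cases h5 : pvWinB prefs i (n : Int) < 5
      · rw [if_pos hc, if_pos h5, hcast, ih]
        have hb : pvCondB prefs i (n : Int) c = true := by simp [pvCondB, hc, h5]
        simp only [pvRowCnt, pvRowMap, hb, if_pos]
        refine Prod.ext (by dsimp; ring) (by simp)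
      · rw [if_pos hc, if_neg h5, hcast, ih]
        have hb : pvCondB prefs i (n : Int) c = false := by simp [pvCondB, h5]
        simp only [pvRowCnt, pvRowMap, hb]
        refine Prod.ext (by dsimp; ring) (by simp)
    · rw [if_neg hc, hcast, ih]
      have hb : pvCondB prefs i (n : Int) c = false := by simp [pvCondB, hc]
      simp only [pvRowCnt, pvRowMap, hb]
      refine Prod.ext (by dsimp; ring) (by simp)

lemma innerA (grid : List (List String)) (i : Nat) :
    ∀ (row : List String) (n : Nat) (a : Int) (ng : List (List String)), i < ng.length →
      (PySem.List.enumerate row (n : Int)).foldl (fun (st2 : Int × List (List String)) q =>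
        if q.2 == "@" then
          if pvCountA grid (i : Int) q.1 < 4 then
            (st2.1 + 1, st2.2.set i ((st2.2.getD i []).set q.1.toNat "."))
          else st2
        else st2) (a, ng)
      = (a + pvRowCnt (pvCondA grid i) row n,
         ng.set i (pvApplyRow (pvCondA grid i) row (ng.getD i []) n)) := by
  intro row
  induction row with
  | nil =>
    intro n a ng hng
    simp only [PySem.List.enumerate_nil, List.foldl_nil, pvRowCnt, pvApplyRow]
    rw [List.getD_eq_getElem?_getD, List.getElem?_eq_getElem hng]
    simp [List.set_getElem_self hng]
  | cons c cs ih =>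
    intro n a ng hng
    rw [PySem.List.enumerate_cons, List.foldl_cons]
    have hcast : ((n : Int) + 1) = ((n + 1 : Nat) : Int) := by push_cast; ring
    simp only [Int.toNat_natCast]
    by_cases hc : (c == "@") = true
    · by_cases h4 : pvCountA grid (i : Int) (n : Int) < 4
      · rw [if_pos hc, if_pos h4, hcast, ih _ _ _ (by simpa using hng)]
        have hcond : pvCondA grid (i : Int) (n : Int) c = true := by simp [pvCondA, hc, h4]
        simp only [pvRowCnt, pvApplyRow, hcond, if_pos]
        refine Prod.ext (by dsimp; ring) ?_
        dsimp
        rw [List.set_set]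
        congr 1
        simp [List.getD_eq_getElem?_getD, hng]
      · rw [if_pos hc, if_neg h4, hcast, ih _ _ _ hng]
        have hcond : pvCondA grid (i : Int) (n : Int) c = false := by simp [pvCondA, h4]
        simp only [pvRowCnt, pvApplyRow, hcond]
        refine Prod.ext (by dsimp; ring) (by dsimp)
    · rw [if_neg hc, hcast, ih _ _ _ hng]
      have hcond : pvCondA grid (i : Int) (n : Int) c = false := by simp [pvCondA, hc]
      simp only [pvRowCnt, pvApplyRow, hcond]
      refine Prod.ext (by dsimp; ring) (by dsimp)

lemma outerB (prefs : List (List Int)) :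
    ∀ (rs : List (List String)) (n : Nat) (a : Int) (out : List (List String)),
      (PySem.List.enumerate rs (n : Int)).foldl (fun (st : Int × List (List String)) p =>
        let inner := (PySem.List.enumerate p.2 0).foldl (fun (st2 : Int × List String) q =>
          if q.2 == "@" then
            if pvWinB prefs p.1 q.1 < 5 then (st2.1 + 1, st2.2 ++ ["."])
            else (st2.1, st2.2 ++ [q.2])
          else (st2.1, st2.2 ++ [q.2])) (st.1, ([] : List String))
        (inner.1, st.2 ++ [inner.2])) (a, out)
      = (a + pvGridCnt (pvCondB prefs) rs n, out ++ pvGridMap (pvCondB prefs) rs n) := by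
  intro rs
  induction rs with
  | nil => intro n a out; simp [PySem.List.enumerate_nil, pvGridCnt, pvGridMap]
  | cons r rs' ih =>
    intro n a out
    rw [PySem.List.enumerate_cons, List.foldl_cons]
    have hcast : ((n : Int) + 1) = ((n + 1 : Nat) : Int) := by push_cast; ring
    have hin := innerB prefs (n : Int) r 0 a []
    simp only [Nat.cast_zero] at hin
    dsimp only
    rw [hin, hcast, ih]
    simp only [pvGridCnt, pvGridMap, List.nil_append]
    refine Prod.ext (by dsimp; ring) (by simp)

lemma outerA (grid : List (List String)) :
    ∀ (rs : List (List String)) (n : Nat) (a : Int) (ng : List (List String)), ng.drop n = rs →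
      (PySem.List.enumerate rs (n : Int)).foldl (fun (st : Int × List (List String)) p =>
        (PySem.List.enumerate p.2 0).foldl (fun (st2 : Int × List (List String)) q =>
          if q.2 == "@" then
            if pvCountA grid p.1 q.1 < 4 then
              (st2.1 + 1, st2.2.set p.1.toNat ((st2.2.getD p.1.toNat []).set q.1.toNat "."))
            else st2
          else st2) st) (a, ng)
      = (a + pvGridCnt (pvCondA grid) rs n, ng.take n ++ pvGridMap (pvCondA grid) rs n) := by
  intro rs
  induction rs with
  | nil =>
    intro n a ng h
    rw [PySem.List.enumerate_nil, List.foldl_nil, pvGridCnt, pvGridMap, List.append_nil,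
      List.take_of_length_le (List.drop_eq_nil_iff.mp h)]
    simp
  | cons r rs' ih =>
    intro n a ng h
    have hlt := pvDropLt ng n r rs' h
    have hget := pvDropGetD ng n r rs' [] h
    have h1 := pvDropSucc ng n r rs' h
    rw [PySem.List.enumerate_cons, List.foldl_cons]
    have hcast : ((n : Int) + 1) = ((n + 1 : Nat) : Int) := by push_cast; ring
    have hin := innerA grid n r 0 a ng hlt
    simp only [Nat.cast_zero] at hin
    dsimp only [Int.toNat_natCast]
    rw [hin, hget, pvApplyRow_eq (pvCondA grid (n : Int)) r r 0 rfl]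
    have h1' : (ng.set n (List.take 0 r ++ pvRowMap (pvCondA grid (n : Int)) r 0)).drop (n + 1) = rs' := by
      rw [List.drop_set_of_lt (by omega : n < n + 1)]; exact h1
    rw [hcast, ih _ _ _ h1']
    simp only [pvGridCnt, pvGridMap, List.take_zero, List.nil_append]
    refine Prod.ext (by dsimp; ring) ?_
    dsimp only
    rw [pvTakeSet ng n _ hlt]
    simp

lemma pvFoldlAppendMap (l : List (List String)) :
    ∀ (acc : List (List Int)),
      l.foldl (fun acc row => acc ++ [pvPrefRow row]) acc = acc ++ l.map pvPrefRow := by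
  induction l with
  | nil => intro acc; simp
  | cons r rs ih => intro acc; rw [List.foldl_cons, ih]; simp

lemma portA_canon (grid : List (List String)) :
    get_accecible_rolls_and_next_grid grid
      = (pvGridCnt (pvCondA grid) grid 0, pvGridMap (pvCondA grid) grid 0) := by
  unfold get_accecible_rolls_and_next_grid
  have hmap : grid.map (fun row => row) = grid := by simp
  have h := outerA grid grid 0 0 grid rfl
  simp only [Nat.cast_zero] at h
  dsimp only
  rw [hmap, h]
  simp

lemma portB_canon (grid : List (List String)) :
    get_accecible_rolls_and_next_grid_alt grid
      = (pvGridCnt (pvCondB (grid.map pvPrefRow)) grid 0,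
         pvGridMap (pvCondB (grid.map pvPrefRow)) grid 0) := by
  unfold get_accecible_rolls_and_next_grid_alt
  rw [pvFoldlAppendMap grid []]
  have h := outerB (grid.map pvPrefRow) grid 0 0 []
  simp only [Nat.cast_zero] at h
  dsimp only
  rw [List.nil_append, h]
  simp

-- ===== the counting argument =====

def pvCell (grid : List (List String)) (r c : Nat) : Int :=
  if r < grid.length ∧ c < (grid.getD r []).length ∧ (grid.getD r []).getD c "" = "@" then 1 else 0

def pvIndA (grid : List (List String)) (r c : Int) : Int :=
  if 0 ≤ r ∧ r < (grid.length : Int) ∧ 0 ≤ c ∧ c < ((grid.headD []).length : Int) then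
    (if PySem.List.pyGetD (PySem.List.pyGetD grid r []) c "" == "@" then 1 else 0)
  else 0

lemma countA_eq_sum (grid : List (List String)) (i j : Int) :
    pvCountA grid i j
      = pvIndA grid (i + -1) (j + -1) + pvIndA grid (i + -1) (j + 0) + pvIndA grid (i + -1) (j + 1)
        + pvIndA grid (i + 0) (j + -1) + pvIndA grid (i + 0) (j + 1)
        + pvIndA grid (i + 1) (j + -1) + pvIndA grid (i + 1) (j + 0) + pvIndA grid (i + 1) (j + 1) := by
  have hfold : ∀ (ds : List (Int × Int)) (a : Int),
      ds.foldl (fun count d =>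
        let r := i + d.1
        let c := j + d.2
        if 0 ≤ r ∧ r < (grid.length : Int) ∧ 0 ≤ c ∧ c < ((grid.headD []).length : Int) then
          (if PySem.List.pyGetD (PySem.List.pyGetD grid r []) c "" == "@" then count + 1 else count)
        else count) a
      = a + (ds.map (fun d => pvIndA grid (i + d.1) (j + d.2))).sum := by
    intro ds
    induction ds with
    | nil => intro a; simp
    | cons d ds ihd =>
      intro a
      rw [List.foldl_cons, ihd]
      have hstep : (let r := i + d.1
          let c := j + d.2
          if 0 ≤ r ∧ r < (grid.length : Int) ∧ 0 ≤ c ∧ c < ((grid.headD []).length : Int) then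
            (if PySem.List.pyGetD (PySem.List.pyGetD grid r []) c "" == "@" then a + 1 else a)
          else a) = a + pvIndA grid (i + d.1) (j + d.2) := by
        dsimp only [pvIndA]
        split_ifs <;> ring
      rw [hstep]
      simp only [List.map_cons, List.sum_cons]
      ring
  unfold pvCountA
  rw [hfold]
  simp only [pvDirections, List.map_cons, List.map_nil, List.sum_cons, List.sum_nil]
  ring

def pvCC (l : List String) (n : Nat) : Nat := if l[n]? = some "@" then 1 else 0

lemma count_drop_take (l : List String) (k : Nat) :
    ((l.drop k).take 3).count "@" = pvCC l k + pvCC l (k + 1) + pvCC l (k + 2) := by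
  induction k generalizing l with
  | zero =>
    rcases l with _ | ⟨a, _ | ⟨b, _ | ⟨c, t⟩⟩⟩ <;>
      simp [pvCC, List.count_cons, List.count_nil] <;> split_ifs <;> simp_all
  | succ k ih =>
    rcases l with _ | ⟨x, xs⟩
    · simp [pvCC]
    · simpa [pvCC, List.drop_succ_cons] using ih xs

lemma count_take2 (l : List String) :
    (l.take 2).count "@" = pvCC l 0 + pvCC l 1 := by
  rcases l with _ | ⟨a, _ | ⟨b, t⟩⟩ <;>
    simp [pvCC, List.count_cons, List.count_nil] <;> split_ifs <;> simp_all

def pvGG {α : Type} (xs : List α) (g : α → Int) (n : Nat) : Int :=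
  match xs[n]? with
  | some x => g x
  | none => 0

lemma fold_drop_take {α : Type} (xs : List α) (g : α → Int) (k : Nat) :
    ((xs.drop k).take 3).foldl (fun s x => s + g x) 0
      = pvGG xs g k + pvGG xs g (k + 1) + pvGG xs g (k + 2) := by
  induction k generalizing xs with
  | zero =>
    rcases xs with _ | ⟨a, _ | ⟨b, _ | ⟨c, t⟩⟩⟩ <;> simp [pvGG, List.foldl]
  | succ k ih =>
    rcases xs with _ | ⟨x, xs⟩
    · simp [pvGG]
    · simpa [pvGG, List.drop_succ_cons] using ih xs

lemma fold_take2 {α : Type} (xs : List α) (g : α → Int) :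
    (xs.take 2).foldl (fun s x => s + g x) 0 = pvGG xs g 0 + pvGG xs g 1 := by
  rcases xs with _ | ⟨a, _ | ⟨b, t⟩⟩ <;> simp [pvGG, List.foldl]

-- prefix-sum characterisation
def pvPrefAux : List String → Int → List Int
  | [], _ => []
  | c :: cs, s =>
    (s + (if c == "@" then 1 else 0)) :: pvPrefAux cs (s + (if c == "@" then 1 else 0))

lemma prefRow_fold (l : List String) :
    ∀ (p0 : List Int) (s0 : Int),
      (l.foldl (fun (st : List Int × Int) cell =>
        let s := st.2 + (if cell == "@" then 1 else 0)
        (st.1 ++ [s], s)) (p0, s0)).1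
      = p0 ++ pvPrefAux l s0 := by
  induction l with
  | nil => intro p0 s0; simp [pvPrefAux]
  | cons c cs ih =>
    intro p0 s0
    rw [List.foldl_cons]
    dsimp only
    rw [ih, pvPrefAux, List.append_assoc]
    rfl

lemma prefRow_eq (l : List String) : pvPrefRow l = 0 :: pvPrefAux l 0 := by
  unfold pvPrefRow
  rw [prefRow_fold l [0] 0]
  rfl

lemma prefAux_len (l : List String) : ∀ s : Int, (pvPrefAux l s).length = l.length := by
  induction l with
  | nil => intro s; rfl
  | cons c cs ih => intro s; simp [pvPrefAux, ih]

lemma prefRow_len (l : List String) : (pvPrefRow l).length = l.length + 1 := by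
  rw [prefRow_eq]; simp [prefAux_len]

lemma prefAux_get (l : List String) :
    ∀ (k : Nat) (s : Int), k < l.length →
      (pvPrefAux l s).getD k 0 = s + ((l.take (k + 1)).count "@" : Int) := by
  induction l with
  | nil => intro k s h; simp at h
  | cons c cs ih =>
    intro k s h
    rcases k with _ | k
    · rw [pvPrefAux, List.getD_cons_zero, List.take_succ_cons, List.take_zero, List.count_cons]
      simp only [List.count_nil]
      split_ifs <;> push_cast <;> ring
    · rw [pvPrefAux, List.getD_cons_succ, ih k _ (by simpa using h),
        List.take_succ_cons, List.count_cons]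
      split_ifs <;> push_cast <;> ring

lemma prefRow_get (l : List String) (t : Nat) (ht : t ≤ l.length) :
    PySem.List.pyGetD (pvPrefRow l) (t : Int) 0 = ((l.take t).count "@" : Int) := by
  rw [PySem.List.pyGetD_natCast, prefRow_eq]
  rcases t with _ | k
  · simp
  · rw [List.getD_cons_succ, prefAux_get l k 0 (by omega)]
    simp

lemma take_min_count (l : List String) (a : Nat) :
    ((l.take (min a l.length)).count "@") = ((l.take a).count "@") := by
  congr 1
  rcases le_total a l.length with h | h
  · rw [min_eq_left h]
  · rw [min_eq_right h, List.take_of_length_le (le_refl _), List.take_of_length_le h]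

lemma count_take_add3 (l : List String) (k : Nat) :
    (l.take (k + 3)).count "@" = (l.take k).count "@" + ((l.drop k).take 3).count "@" := by
  rw [List.take_add, List.count_append]

lemma rowTermB_eq (l : List String) (m : Nat) :
    pvTermB (pvPrefRow l) (m : Int)
      = (if m = 0 then (pvCC l 0 + pvCC l 1 : Nat)
         else (pvCC l (m - 1) + pvCC l m + pvCC l (m + 1) : Nat)) := by
  unfold pvTermB
  have hlen : ((pvPrefRow l).length : Int) - 1 = (l.length : Int) := by
    rw [prefRow_len]; push_cast; ring
  rw [hlen]
  rcases m with _ | k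
  · have hhi : min (((0 : Nat) : Int) + 2) (l.length : Int) = ((min 2 l.length : Nat) : Int) := by
      push_cast; norm_num
    have hlo : min (max (((0 : Nat) : Int) - 1) 0) (l.length : Int) = ((0 : Nat) : Int) := by
      push_cast
      rw [show max (-1 : Int) 0 = 0 from by decide]
      exact min_eq_left (by positivity)
    rw [hhi, hlo, prefRow_get l (min 2 l.length) (min_le_right _ _),
      prefRow_get l 0 (Nat.zero_le _), take_min_count, count_take2]
    simp
  · have hhi : min (((k + 1 : Nat) : Int) + 2) (l.length : Int)
        = ((min (k + 3) l.length : Nat) : Int) := by push_cast; omega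
    have hlo : min (max (((k + 1 : Nat) : Int) - 1) 0) (l.length : Int)
        = ((min k l.length : Nat) : Int) := by push_cast; omega
    rw [hhi, hlo, prefRow_get l _ (min_le_right _ _), prefRow_get l _ (min_le_right _ _),
      take_min_count, take_min_count, count_take_add3, count_drop_take]
    rw [if_neg (Nat.succ_ne_zero k)]
    have e1 : k + 1 - 1 = k := by omega
    have e2 : k + 1 + 1 = k + 2 := by omega
    rw [e1, e2]
    push_cast; ring

def pvW (grid : List (List String)) (m r : Nat) : Int :=
  if m = 0 then pvCell grid r 0 + pvCell grid r 1
  else pvCell grid r (m - 1) + pvCell grid r m + pvCell grid r (m + 1)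

lemma pvCell_oob (grid : List (List String)) (r c : Nat) (h : ¬ r < grid.length) :
    pvCell grid r c = 0 := by
  unfold pvCell
  rw [if_neg (by rintro ⟨h1, -⟩; omega)]

lemma pvCell_eq_cc (grid : List (List String)) (r c : Nat) (hr : r < grid.length) :
    pvCell grid r c = (pvCC (grid.getD r []) c : Int) := by
  have hrow : grid.getD r [] = grid[r] := by
    rw [List.getD_eq_getElem?_getD, List.getElem?_eq_getElem hr]; rfl
  unfold pvCell pvCC
  rw [hrow]
  by_cases hc : c < (grid[r]).length
  · have hg : (grid[r]).getD c "" = (grid[r])[c] := by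
      rw [List.getD_eq_getElem?_getD, List.getElem?_eq_getElem hc]; rfl
    rw [List.getElem?_eq_getElem hc, hg]
    by_cases hat : (grid[r])[c] = "@"
    · rw [if_pos ⟨hr, hc, hat⟩, if_pos (by simp [hat])]; rfl
    · rw [if_neg (by rintro ⟨-, -, h⟩; exact hat h), if_neg (by simp [hat])]; rfl
  · rw [List.getElem?_eq_none (by omega), if_neg (by rintro ⟨-, h, -⟩; omega)]
    simp

lemma indA_eq_cell (grid : List (List String))
    (hrect : ∀ row ∈ grid, row.length = (grid.headD []).length) (r c : Nat) :
    pvIndA grid (r : Int) (c : Int) = pvCell grid r c := by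
  unfold pvIndA pvCell
  by_cases hr : r < grid.length
  · have hrow : grid.getD r [] = grid[r] := by
      rw [List.getD_eq_getElem?_getD, List.getElem?_eq_getElem hr]; rfl
    have hlen : (grid[r]).length = (grid.headD []).length := hrect _ (List.getElem_mem hr)
    rw [PySem.List.pyGetD_natCast, PySem.List.pyGetD_natCast, hrow]
    by_cases hc : c < (grid[r]).length
    · have hg : (grid[r]).getD c "" = (grid[r])[c] := by
        rw [List.getD_eq_getElem?_getD, List.getElem?_eq_getElem hc]; rfl
      rw [hg]
      rw [if_pos ⟨by positivity, by exact_mod_cast hr, by positivity,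
            by rw [← hlen]; exact_mod_cast hc⟩]
      by_cases hat : (grid[r])[c] = "@"
      · rw [if_pos (by simp [hat]), if_pos ⟨hr, hc, hat⟩]
      · rw [if_neg (by simp [hat]), if_neg (by rintro ⟨-, -, h⟩; exact hat h)]
    · rw [if_neg (by rintro ⟨-, -, -, h⟩; rw [← hlen] at h; exact hc (by exact_mod_cast h)),
        if_neg (by rintro ⟨-, h, -⟩; omega)]
  · rw [if_neg (by rintro ⟨-, h, -⟩; exact hr (by exact_mod_cast h)),
      if_neg (by rintro ⟨h, -⟩; omega)]

lemma indA_neg_row (grid : List (List String)) (r c : Int) (h : r < 0) : pvIndA grid r c = 0 := by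
  unfold pvIndA
  rw [if_neg (by rintro ⟨h1, -⟩; omega)]

lemma indA_neg_col (grid : List (List String)) (r c : Int) (h : c < 0) : pvIndA grid r c = 0 := by
  unfold pvIndA
  rw [if_neg (by rintro ⟨-, -, h1, -⟩; omega)]

lemma gg_eq_W (grid : List (List String)) (m r : Nat) :
    pvGG (grid.map pvPrefRow) (fun p => pvTermB p (m : Int)) r = pvW grid m r := by
  unfold pvGG pvW
  rw [List.getElem?_map]
  by_cases hr : r < grid.length
  · have hrow : grid.getD r [] = grid[r] := by
      rw [List.getD_eq_getElem?_getD, List.getElem?_eq_getElem hr]; rfl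
    rw [List.getElem?_eq_getElem hr]
    dsimp only [Option.map_some]
    rw [rowTermB_eq]
    rcases m with _ | t
    · rw [if_pos rfl, if_pos rfl, pvCell_eq_cc grid r 0 hr, pvCell_eq_cc grid r 1 hr, hrow]
      push_cast; ring
    · rw [if_neg (Nat.succ_ne_zero t), if_neg (Nat.succ_ne_zero t),
        pvCell_eq_cc grid r (t + 1 - 1) hr, pvCell_eq_cc grid r (t + 1) hr,
        pvCell_eq_cc grid r (t + 1 + 1) hr, hrow]
      push_cast; ring
  · rw [List.getElem?_eq_none (by omega)]
    dsimp only
    split_ifs <;> simp [pvCell_oob grid r _ hr]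

lemma pvW_eq_indA (grid : List (List String))
    (hrect : ∀ row ∈ grid, row.length = (grid.headD []).length) (m r : Nat) :
    pvW grid m r
      = pvIndA grid (r : Int) ((m : Int) + -1) + pvIndA grid (r : Int) (m : Int)
        + pvIndA grid (r : Int) ((m : Int) + 1) := by
  unfold pvW
  rcases m with _ | t
  · have h1 : ((0 : Nat) : Int) + -1 = -1 := by norm_num
    have h2 : ((0 : Nat) : Int) + 1 = ((1 : Nat) : Int) := by norm_num
    rw [if_pos rfl, h1, h2, indA_neg_col grid ((r : Nat) : Int) (-1) (by norm_num),
      indA_eq_cell grid hrect r 0, indA_eq_cell grid hrect r 1]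
    ring
  · have h1 : ((t + 1 : Nat) : Int) + -1 = ((t : Nat) : Int) := by push_cast; ring
    have h2 : ((t + 1 : Nat) : Int) + 1 = ((t + 2 : Nat) : Int) := by push_cast; ring
    have e1 : t + 1 - 1 = t := by omega
    have e2 : t + 1 + 1 = t + 2 := by omega
    rw [if_neg (Nat.succ_ne_zero t), h1, h2, e1,
      indA_eq_cell grid hrect r t, indA_eq_cell grid hrect r (t + 1),
      indA_eq_cell grid hrect r (t + 2), e2]

lemma winB_eq (grid : List (List String))
    (hrect : ∀ row ∈ grid, row.length = (grid.headD []).length) (n m : Nat) :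
    pvWinB (grid.map pvPrefRow) (n : Int) (m : Int)
      = (pvIndA grid ((n : Int) + -1) ((m : Int) + -1) + pvIndA grid ((n : Int) + -1) (m : Int)
          + pvIndA grid ((n : Int) + -1) ((m : Int) + 1))
        + (pvIndA grid (n : Int) ((m : Int) + -1) + pvIndA grid (n : Int) (m : Int)
          + pvIndA grid (n : Int) ((m : Int) + 1))
        + (pvIndA grid ((n : Int) + 1) ((m : Int) + -1) + pvIndA grid ((n : Int) + 1) (m : Int)
          + pvIndA grid ((n : Int) + 1) ((m : Int) + 1)) := by
  unfold pvWinB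
  rcases n with _ | k
  · have h1 : ((0 : Nat) : Int) - 1 = -1 := by norm_num
    have h2 : max (-1 : Int) 0 = 0 := by decide
    have h3 : ((0 : Nat) : Int) + 2 = 2 := by norm_num
    rw [h1, h2, h3]
    have h4 : PySem.List.slice (grid.map pvPrefRow) (some (0 : Int)) (some (2 : Int))
        = (grid.map pvPrefRow).take 2 := by
      rw [PySem.List.slice_zero_start, PySem.List.slice_to _ (by norm_num)]
      rfl
    rw [h4, fold_take2, gg_eq_W, gg_eq_W, pvW_eq_indA grid hrect m 0, pvW_eq_indA grid hrect m 1]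
    have hr1 : ((0 : Nat) : Int) + -1 = -1 := by norm_num
    have hr2 : ((0 : Nat) : Int) + 1 = ((1 : Nat) : Int) := by norm_num
    rw [hr1, hr2, indA_neg_row grid (-1) ((m : Int) + -1) (by norm_num),
      indA_neg_row grid (-1) (m : Int) (by norm_num),
      indA_neg_row grid (-1) ((m : Int) + 1) (by norm_num)]
    ring
  · have h1 : ((k + 1 : Nat) : Int) - 1 = ((k : Nat) : Int) := by push_cast; ring
    have h2 : max ((k : Nat) : Int) 0 = ((k : Nat) : Int) := max_eq_left (by positivity)
    have h3 : ((k + 1 : Nat) : Int) + 2 = ((k : Nat) : Int) + ((3 : Nat) : Int) := by push_cast; ring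
    rw [h1, h2, h3, PySem.List.slice_natCast_add, fold_drop_take, gg_eq_W, gg_eq_W, gg_eq_W,
      pvW_eq_indA grid hrect m k, pvW_eq_indA grid hrect m (k + 1), pvW_eq_indA grid hrect m (k + 2)]
    have hr1 : ((k + 1 : Nat) : Int) + -1 = ((k : Nat) : Int) := by push_cast; ring
    have hr2 : ((k + 1 : Nat) : Int) + 1 = ((k + 2 : Nat) : Int) := by push_cast; ring
    rw [hr1, hr2]

lemma countB_eq (grid : List (List String))
    (hrect : ∀ row ∈ grid, row.length = (grid.headD []).length)
    (n m : Nat) (hn : n < grid.length) (hm : m < (grid.getD n []).length)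
    (hat : (grid.getD n []).getD m "" = "@") :
    pvWinB (grid.map pvPrefRow) (n : Int) (m : Int) = pvCountA grid (n : Int) (m : Int) + 1 := by
  rw [winB_eq grid hrect n m, countA_eq_sum grid (n : Int) (m : Int)]
  have hcen : pvIndA grid (n : Int) (m : Int) = 1 := by
    rw [indA_eq_cell grid hrect n m]
    unfold pvCell
    rw [if_pos ⟨hn, hm, hat⟩]
  simp only [add_zero]
  rw [hcen]
  ring

lemma cond_eq (grid : List (List String)) (hpre : Pre_get_accecible_rolls_and_next_grid grid)
    (n m : Nat) (hn : n < grid.length) (hm : m < (grid.getD n []).length) :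
    pvCondA grid n m ((grid.getD n []).getD m "")
      = pvCondB (grid.map pvPrefRow) n m ((grid.getD n []).getD m "") := by
  unfold pvCondA pvCondB
  by_cases hc : ((grid.getD n []).getD m "" == "@") = true
  · rcases hpre with hrect | hno
    · rw [countB_eq grid hrect n m hn hm (by simpa using hc)]
      congr 1
      exact decide_eq_decide.mpr (by omega)
    · exfalso
      have hrow : grid.getD n [] = grid[n] := by
        rw [List.getD_eq_getElem?_getD, List.getElem?_eq_getElem hn]; rfl
      have hcell : (grid.getD n [])[m] = "@" := by
        have h2 : (grid.getD n []).getD m "" = (grid.getD n [])[m] := by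
          rw [List.getD_eq_getElem?_getD, List.getElem?_eq_getElem hm]; rfl
        rw [← h2]; simpa using hc
      exact hno (grid[n]) (List.getElem_mem hn)
        (by rw [← hrow, ← hcell]; exact List.getElem_mem hm)
  · rw [Bool.not_eq_true] at hc
    rw [hc]
    simp

lemma row_congr (c1 c2 : Int → String → Bool) (row : List String)
    (h : ∀ (k : Nat), k < row.length → c1 k (row.getD k "") = c2 k (row.getD k "")) :
    ∀ (cs : List String) (n : Nat), row.drop n = cs →
      pvRowCnt c1 cs n = pvRowCnt c2 cs n ∧ pvRowMap c1 cs n = pvRowMap c2 cs n := by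
  intro cs
  induction cs with
  | nil => intro n _; exact ⟨rfl, rfl⟩
  | cons c cs' ih =>
    intro n hdrop
    have hlt := pvDropLt row n c cs' hdrop
    have hget := pvDropGetD row n c cs' "" hdrop
    have h1 := pvDropSucc row n c cs' hdrop
    have hc : c1 (n : Int) c = c2 (n : Int) c := by rw [← hget]; exact h n hlt
    obtain ⟨ihc, ihm⟩ := ih (n + 1) h1
    unfold pvRowCnt pvRowMap
    rw [hc, ihc, ihm]
    exact ⟨rfl, rfl⟩

lemma grid_congr (grid : List (List String)) (hpre : Pre_get_accecible_rolls_and_next_grid grid) :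
    ∀ (rs : List (List String)) (n : Nat), grid.drop n = rs →
      pvGridCnt (pvCondA grid) rs n = pvGridCnt (pvCondB (grid.map pvPrefRow)) rs n ∧
      pvGridMap (pvCondA grid) rs n = pvGridMap (pvCondB (grid.map pvPrefRow)) rs n := by
  intro rs
  induction rs with
  | nil => intro n _; exact ⟨rfl, rfl⟩
  | cons r rs' ih =>
    intro n hdrop
    have hlt := pvDropLt grid n r rs' hdrop
    have hget := pvDropGetD grid n r rs' [] hdrop
    have h1 := pvDropSucc grid n r rs' hdrop
    have hcells : ∀ (k : Nat), k < r.length →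
        pvCondA grid (n : Int) (k : Int) (r.getD k "")
          = pvCondB (grid.map pvPrefRow) (n : Int) (k : Int) (r.getD k "") := by
      intro k hk
      rw [← hget]
      exact cond_eq grid hpre n k hlt (by rw [hget]; exact hk)
    obtain ⟨hrc, hrm⟩ := row_congr (pvCondA grid (n : Int))
      (pvCondB (grid.map pvPrefRow) (n : Int)) r hcells r 0 rfl
    obtain ⟨ihc, ihm⟩ := ih (n + 1) h1
    unfold pvGridCnt pvGridMap
    rw [hrc, hrm, ihc, ihm]
    exact ⟨rfl, rfl⟩

-- ===== VERDICT (by name: the statement is the Claim_ definition above) =====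
theorem get_accecible_rolls_and_next_grid_spec : Claim_equal_get_accecible_rolls_and_next_grid := by
  intro grid _ hpre
  unfold Spec_get_accecible_rolls_and_next_grid
  rw [portA_canon, portB_canon]
  obtain ⟨h1, h2⟩ := grid_congr grid hpre grid 0 rfl
  rw [h1, h2]
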